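-- pv_equiv track=rewrite | github.com/Davi-Paiva/jarvis | jarvis-backend/app/services/repo_context_builder.py | filter_scope
-- ===== SOURCE A (Python) =====
-- from typing import Callable, Iterable, List, Optional
--
-- def filter_scope(files: List[str], scope: Iterable[str]) -> List[str]:
--     normalized_scope = [str(item).strip().strip("/") for item in scope if str(item).strip()]
--     if not normalized_scope:
--         return files
--     return [
--         path
--         for path in files
--         if any(path == item or path.startswith(item + "/") for item in normalized_scope)
--     ]
-- ===== SOURCE B (Python) =====
-- def filter_scope(files, scope):
--     allowed = set()
--     for item in scope:
--         s = str(item).strip()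
--         if s:
--             allowed.add(s.strip("/"))
--     if not allowed:
--         return files
--     result = []
--     for path in files:
--         if path in allowed or any(
--             path[:i] in allowed for i, c in enumerate(path) if c == "/"
--         ):
--             result.append(path)
--     return result
-- ===== Notes on version B (the rewrite author's own statement) =====
-- stated objective: faster
-- what changed: B replaces the per-file any() scan over the scope list with a hash set of normalized scope items queried once for each slash-delimited ancestor prefix of the file path, so the inner loop is over the path's components instead of the scope list.
import Mathlib
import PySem

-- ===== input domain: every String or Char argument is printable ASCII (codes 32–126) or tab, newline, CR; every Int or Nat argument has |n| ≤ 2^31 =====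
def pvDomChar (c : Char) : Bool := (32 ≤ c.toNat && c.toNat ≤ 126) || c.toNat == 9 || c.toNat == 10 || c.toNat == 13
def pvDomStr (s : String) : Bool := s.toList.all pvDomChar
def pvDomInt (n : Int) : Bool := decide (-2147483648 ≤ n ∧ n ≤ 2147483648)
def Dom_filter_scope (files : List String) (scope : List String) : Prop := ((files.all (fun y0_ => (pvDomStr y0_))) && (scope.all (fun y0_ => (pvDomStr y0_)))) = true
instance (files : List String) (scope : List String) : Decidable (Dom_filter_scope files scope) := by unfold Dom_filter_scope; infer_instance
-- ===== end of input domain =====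

-- B replaces the per-file any() scan over the whole scope list with one hash set of normalized
-- scope items, queried for each slash-delimited ancestor prefix of the file path (objective: faster).

-- ===== PORT A =====
def filter_scope (files : List String) (scope : List String) : List String :=
  let normalized := (scope.filter (fun item => !(PySem.Str.strip item == ""))).map
      (fun item => PySem.Str.stripChars (PySem.Str.strip item) "/")
  if normalized = [] then files
  else files.filter (fun path =>
    normalized.any (fun item => path == item || PySem.Str.startswith path (item ++ "/")))

-- ===== PORT B =====
-- 'path in allowed or any(path[:i] in allowed for i, c in enumerate(path) if c == "/")'
def fsHit (allowed : PySem.Set String) (path : String) : Bool :=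
  PySem.Set.contains allowed path ||
  (PySem.List.enumerate path.toList 0).any (fun p =>
    p.2 == '/' && PySem.Set.contains allowed
      (String.ofList (PySem.List.slice path.toList none (some p.1))))

-- 's = str(item).strip(); if s: allowed.add(s.strip("/"))'
def fsStep (s : PySem.Set String) (item : String) : PySem.Set String :=
  let t := PySem.Str.strip item
  if !(t == "") then PySem.Set.add s (PySem.Str.stripChars t "/") else s

def filter_scope_alt (files : List String) (scope : List String) : List String :=
  let allowed : PySem.Set String := scope.foldl fsStep []
  if allowed = [] then files
  else files.filter (fun path => fsHit allowed path)

-- ===== PRECONDITION & SPEC =====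
def Spec_filter_scope (files : List String) (scope : List String) (out : List String) : Prop := out = filter_scope_alt files scope
instance (files : List String) (scope : List String) (out : List String) : Decidable (Spec_filter_scope files scope out) := by unfold Spec_filter_scope; infer_instance

-- ===== CLAIM (what is proved, stated in full; the proofs are below) =====
def Claim_equal_filter_scope : Prop := ∀ (files : List String) (scope : List String), Dom_filter_scope files scope → Spec_filter_scope files scope (filter_scope files scope)

-- ===== LEMMAS AND PROOFS =====

-- the accumulator loop of B builds exactly set(normalized_scope) of A
theorem fs_allowed_eq (scope : List String) (acc : PySem.Set String) :
    scope.foldl fsStep acc =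
    ((scope.filter (fun item => !(PySem.Str.strip item == ""))).map
      (fun item => PySem.Str.stripChars (PySem.Str.strip item) "/")).foldl PySem.Set.add acc := by
  induction scope generalizing acc with
  | nil => rfl
  | cons x xs ih =>
      rw [List.foldl_cons, List.filter_cons]
      by_cases h : PySem.Str.strip x = ""
      · have hb : (!(PySem.Str.strip x == "")) = false := by simp [h]
        have hs : fsStep acc x = acc := by unfold fsStep; simp [h]
        rw [hs, hb]
        simpa using ih acc
      · have hb : (!(PySem.Str.strip x == "")) = true := by simp [h]
        have hs : fsStep acc x = PySem.Set.add acc (PySem.Str.stripChars (PySem.Str.strip x) "/") := by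
          unfold fsStep; simp [h]
        rw [hs, hb]
        simpa using ih _

theorem ofList_eq_nil_iff {α : Type} [BEq α] [LawfulBEq α] (xs : List α) :
    PySem.Set.ofList xs = [] ↔ xs = [] := by
  constructor
  · intro h
    cases xs with
    | nil => rfl
    | cons y ys =>
        exfalso
        have : y ∈ PySem.Set.ofList (y :: ys) := (PySem.Set.mem_ofList _ _).2 (by simp)
        simp [h] at this
  · intro h; subst h; rfl

-- (a ++ [c]) is a prefix of s iff c sits in s right after a copy of a
theorem append_singleton_prefix_iff {α : Type} (a s : List α) (c : α) :
    (a ++ [c]) <+: s ↔ ∃ k, ∃ h : k < s.length, s[k] = c ∧ a = s.take k := by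
  constructor
  · intro h
    have hlen : a.length + 1 ≤ s.length := by
      have := h.length_le; simpa using this
    have hpre : a <+: s := (a.prefix_append [c]).trans h
    refine ⟨a.length, by omega, ?_, List.prefix_iff_eq_take.1 hpre⟩
    have hg := h.getElem (i := a.length) (by simp)
    simpa using hg.symm
  · rintro ⟨k, hk, hc, ha⟩
    have : a ++ [c] = s.take (k + 1) := by
      rw [List.take_add_one, ha, ← hc]
      simp [List.getElem?_eq_getElem hk]
    rw [this]; exact List.take_prefix _ _

-- B's per-path ancestor test computes exactly A's any() over the normalized scope
theorem fsHit_eq (normalized : List String) (path : String) :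
    fsHit (PySem.Set.ofList normalized) path =
    normalized.any (fun item => path == item || PySem.Str.startswith path (item ++ "/")) := by
  rcases Bool.eq_false_or_eq_true
      (normalized.any (fun item => path == item || PySem.Str.startswith path (item ++ "/"))) with h | h
  · rw [h]
    rw [List.any_eq_true] at h
    obtain ⟨item, hmem, hit⟩ := h
    unfold fsHit
    rw [Bool.or_eq_true]
    simp only [Bool.or_eq_true, beq_iff_eq] at hit
    rcases hit with hit | hit
    · left
      rw [PySem.Set.contains_iff, PySem.Set.mem_ofList, hit]; exact hmem
    · right
      rw [PySem.Str.startswith_eq, PySem.Chars.startswith_iff] at hit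
      have : (item.toList ++ ['/']) <+: path.toList := by simpa using hit
      rw [append_singleton_prefix_iff] at this
      obtain ⟨k, hk, hc, ha⟩ := this
      rw [List.any_eq_true]
      refine ⟨((k : Int), path.toList[k]), ?_, ?_⟩
      · rw [PySem.List.mem_enumerate_iff]; exact ⟨k, hk, by simp⟩
      · simp only [hc, beq_self_eq_true, Bool.true_and]
        rw [PySem.Set.contains_iff, PySem.Set.mem_ofList]
        have : String.ofList (PySem.List.slice path.toList none (some ((k : Nat) : Int))) = item := by
          rw [PySem.List.slice_to_natCast, ← ha, String.ofList_toList]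
        rw [this]; exact hmem

  · rw [h]
    rw [List.any_eq_false] at h
    unfold fsHit
    rw [Bool.or_eq_false_iff]
    refine ⟨?_, ?_⟩
    · rw [Bool.eq_false_iff]
      intro hcon
      rw [PySem.Set.contains_iff, PySem.Set.mem_ofList] at hcon
      exact (h path hcon) (by simp)
    · rw [List.any_eq_false]
      rintro ⟨i, c⟩ hp
      rw [PySem.List.mem_enumerate_iff] at hp
      obtain ⟨k, hk, hpe⟩ := hp
      cases hpe
      simp only [Bool.and_eq_true, beq_iff_eq, not_and]
      intro hck hcon
      rw [PySem.Set.contains_iff, PySem.Set.mem_ofList] at hcon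
      apply h _ hcon
      rw [Bool.or_eq_true]
      right
      rw [PySem.Str.startswith_eq, PySem.Chars.startswith_iff]
      have htl : ((String.ofList (PySem.List.slice path.toList none (some (0 + (k : Int))))) ++ "/").toList
          = path.toList.take k ++ ['/'] := by
        simp [PySem.List.slice_to_natCast]
      rw [htl]
      exact (append_singleton_prefix_iff _ _ _).2 ⟨k, hk, hck, rfl⟩

-- ===== VERDICT (by name: the statement is the Claim_ definition above) =====
theorem filter_scope_spec : Claim_equal_filter_scope := by
  intro files scope _
  unfold Spec_filter_scope filter_scope filter_scope_alt
  rw [fs_allowed_eq, ← PySem.Set.ofList_eq_foldl]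
  set normalized := (scope.filter (fun item => !(PySem.Str.strip item == ""))).map
      (fun item => PySem.Str.stripChars (PySem.Str.strip item) "/")
  by_cases h : normalized = []
  · rw [if_pos h, if_pos (by rwa [ofList_eq_nil_iff])]
  · rw [if_neg h, if_neg (by rwa [ofList_eq_nil_iff])]
    apply List.filter_congr
    intro path _
    exact (fsHit_eq normalized path).symm
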